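-- pv_equiv track=rewrite | github.com/r-valdez-a/Cachitos | game/bet_validator.py | count_dice
-- ===== SOURCE A (Python) =====
-- def count_dice(all_dice: list, value: int, wilds_count: bool = True) -> int:
--     """
--     Count how many dice match a value across all players
--
--     Args:
--         all_dice: List of lists of dice values
--         value: The value to count
--         wilds_count: Whether 1s count as wild (False during Palo Fijo)
--     """
--     count = 0
--     for player_dice in all_dice:
--         for die in player_dice:
--             if die == value:
--                 count += 1
--             elif die == 1 and value != 1 and wilds_count:
--                 # 1s are wild for non-1 values (unless Palo Fijo)
--                 count += 1
--     return count
-- ===== SOURCE B (Python) =====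
-- def count_dice(all_dice: list, value: int, wilds_count: bool = True) -> int:
--     # Build a frequency table over all dice once, then answer by table lookups.
--     freq = {}
--     for player_dice in all_dice:
--         for die in player_dice:
--             freq[die] = freq.get(die, 0) + 1
--     count = freq.get(value, 0)
--     if wilds_count and value != 1:
--         count += freq.get(1, 0)
--     return count
-- ===== Notes on version B (the rewrite author's own statement) =====
-- stated objective: idiomatic
-- what changed: Replaces the per-die branching scan with a frequency-table build (dict of die->count) followed by constant-number lookups: freq[value] plus freq[1] only when wilds apply and value != 1.
import Mathlib
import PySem

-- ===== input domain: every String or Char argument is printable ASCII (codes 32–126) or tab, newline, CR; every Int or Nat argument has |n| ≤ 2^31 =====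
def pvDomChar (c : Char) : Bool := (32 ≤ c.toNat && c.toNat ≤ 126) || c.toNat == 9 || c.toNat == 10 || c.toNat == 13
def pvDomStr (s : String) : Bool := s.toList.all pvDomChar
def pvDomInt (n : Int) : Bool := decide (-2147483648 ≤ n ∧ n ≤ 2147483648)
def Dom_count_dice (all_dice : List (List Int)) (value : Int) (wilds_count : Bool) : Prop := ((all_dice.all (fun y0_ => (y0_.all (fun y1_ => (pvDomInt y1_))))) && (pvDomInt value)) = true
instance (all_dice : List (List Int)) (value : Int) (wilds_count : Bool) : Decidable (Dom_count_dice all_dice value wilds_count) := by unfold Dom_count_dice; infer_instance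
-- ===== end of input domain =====

-- ===== PORT A =====
def count_dice (all_dice : List (List Int)) (value : Int) (wilds_count : Bool) : Int :=
  all_dice.foldl (fun count player_dice =>
    player_dice.foldl (fun count die =>
      if die == value then count + 1
      else if die == 1 && value != 1 && wilds_count then count + 1
      else count) count) 0

-- ===== PORT B =====
-- B: build a frequency table over all dice, then answer by lookups.
def count_dice_alt (all_dice : List (List Int)) (value : Int) (wilds_count : Bool) : Int :=
  let freq : PySem.Dict Int Int :=
    all_dice.foldl (fun freq player_dice =>
      player_dice.foldl (fun freq die => freq.insert die (freq.getD die 0 + 1)) freq)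
      PySem.Dict.empty
  let count := freq.getD value 0
  if wilds_count && value != 1 then count + freq.getD 1 0 else count

-- ===== PRECONDITION & SPEC =====
def Spec_count_dice (all_dice : List (List Int)) (value : Int) (wilds_count : Bool) (out : Int) : Prop := out = count_dice_alt all_dice value wilds_count
instance (all_dice : List (List Int)) (value : Int) (wilds_count : Bool) (out : Int) : Decidable (Spec_count_dice all_dice value wilds_count out) := by unfold Spec_count_dice; infer_instance

-- ===== CLAIM (what is proved, stated in full; the proofs are below) =====
def Claim_equal_count_dice : Prop := ∀ (all_dice : List (List Int)) (value : Int) (wilds_count : Bool), Dom_count_dice all_dice value wilds_count → Spec_count_dice all_dice value wilds_count (count_dice all_dice value wilds_count)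

-- ===== LEMMAS AND PROOFS =====

-- ===== VERDICT (by name: the statement is the Claim_ definition above) =====
theorem freq_getD (all_dice : List (List Int)) (d : PySem.Dict Int Int) (v : Int) :
    (all_dice.foldl (fun freq player_dice =>
        player_dice.foldl (fun freq die => freq.insert die (freq.getD die 0 + 1)) freq) d).getD v 0
      = d.getD v 0 + (all_dice.map (fun p => (p.count v : Int))).sum := by
  induction all_dice generalizing d with
  | nil => simp
  | cons p rest ih =>
    rw [List.foldl_cons, ih, PySem.Dict.getD_foldl_insert_add_one]
    simp; ring

theorem inner_loop_eq (player_dice : List Int) (value : Int) (wilds_count : Bool) (acc : Int) :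
    player_dice.foldl (fun count die =>
      if die == value then count + 1
      else if die == 1 && value != 1 && wilds_count then count + 1
      else count) acc
    = acc + (player_dice.count value : Int)
      + (if wilds_count && value != 1 then (player_dice.count 1 : Int) else 0) := by
  induction player_dice generalizing acc with
  | nil => simp
  | cons d rest ih =>
    simp only [List.foldl_cons, List.count_cons, ih]
    by_cases hv : d = value <;> by_cases h1 : d = 1 <;> by_cases hw : wilds_count <;>
      by_cases hvn : value = 1 <;> simp_all <;> ring

theorem outer_eq (all_dice : List (List Int)) (value : Int) (wilds_count : Bool) (acc : Int) :
    all_dice.foldl (fun count player_dice =>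
      player_dice.foldl (fun count die =>
        if die == value then count + 1
        else if die == 1 && value != 1 && wilds_count then count + 1
        else count) count) acc
    = acc + (all_dice.map (fun p => (p.count value : Int))).sum
      + (if wilds_count && value != 1 then (all_dice.map (fun p => (p.count 1 : Int))).sum else 0) := by
  induction all_dice generalizing acc with
  | nil => simp
  | cons p rest ih =>
    rw [List.foldl_cons, inner_loop_eq, ih]
    simp only [List.map_cons, List.sum_cons]
    split <;> ring

theorem count_dice_spec : Claim_equal_count_dice := by
  intro all_dice value wilds_count _
  unfold Spec_count_dice count_dice count_dice_alt
  rw [outer_eq]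
  simp only [freq_getD, PySem.Dict.getD_empty]
  split <;> ring
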